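-- pv_equiv track=rewrite | github.com/Subhampreet/Competitive-Programming-Solutions | Mathematical/104-GCD_of_digits_of_Number.py | digitGCD
-- ===== SOURCE A (Python) =====
-- def find_gcd(a,b):
--     if(a == 0):
--         return b
--     return find_gcd(b % a, a)
--
-- def digitGCD(n):
--
--     gcd = 0
--     while (n > 0):
--
--         gcd = find_gcd(gcd , n % 10)
--
--         if (gcd == 1):
--             return 1
--
--         n = n // 10
--
--     return gcd
-- ===== SOURCE B (Python) =====
-- def digitGCD(n):
--     # Phase 1: extract all digits; Phase 2: fold an iterative Euclid over them.
--     digits = []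
--     while n > 0:
--         digits.append(n % 10)
--         n //= 10
--     g = 0
--     for d in digits:
--         while d:
--             g, d = d, g % d
--     return g
-- ===== Notes on version B (the rewrite author's own statement) =====
-- stated objective: alternative
-- what changed: Two-phase decomposition: first extract the full digit list, then fold an iterative Euclid over it, replacing A's fused loop with recursive find_gcd and early exit at gcd==1.
import Mathlib
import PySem

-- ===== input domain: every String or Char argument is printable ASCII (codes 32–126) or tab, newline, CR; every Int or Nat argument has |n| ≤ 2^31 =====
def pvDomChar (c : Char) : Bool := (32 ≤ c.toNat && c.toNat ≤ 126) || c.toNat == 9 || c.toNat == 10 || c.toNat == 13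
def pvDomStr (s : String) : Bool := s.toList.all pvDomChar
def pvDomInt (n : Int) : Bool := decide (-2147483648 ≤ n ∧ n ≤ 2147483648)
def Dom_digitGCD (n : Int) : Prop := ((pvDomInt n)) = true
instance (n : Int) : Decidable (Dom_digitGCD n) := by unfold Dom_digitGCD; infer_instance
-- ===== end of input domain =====

-- B replaces A's fused loop (recursive find_gcd, early exit at gcd==1) by a two-phase
-- decomposition: extract the digit list, then fold an iterative Euclid over it (objective: alternative).

-- termination helper used by both ports: Python's % shrinks |divisor|
theorem pv_mod_natAbs_lt (b a : Int) (h : a ≠ 0) : (PySem.Int.mod b a).natAbs < a.natAbs := by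
  rcases lt_or_gt_of_ne h with hneg | hpos
  · have := PySem.Int.mod_neg_bounds b hneg
    omega
  · have h1 := PySem.Int.mod_nonneg b hpos
    have h2 := PySem.Int.mod_lt b hpos
    omega

-- ===== PORT A =====
def findGcd (a b : Int) : Int :=
  if _h : a = 0 then b
  else findGcd (PySem.Int.mod b a) a
termination_by a.natAbs
decreasing_by exact pv_mod_natAbs_lt b a _h

def digitGCDLoopA (n gcd : Int) : Int :=
  if _h : 0 < n then
    let gcd' := findGcd gcd (PySem.Int.mod n 10)
    if gcd' = 1 then 1
    else digitGCDLoopA (PySem.Int.floordiv n 10) gcd'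
  else gcd
termination_by n.toNat
decreasing_by
  rw [PySem.Int.floordiv_eq_ediv_of_pos (by norm_num : (0:Int) < 10)]
  omega

def digitGCD (n : Int) : Int := digitGCDLoopA n 0

-- ===== PORT B =====
def digitsOf (n : Int) : List Int :=
  if _h : 0 < n then PySem.Int.mod n 10 :: digitsOf (PySem.Int.floordiv n 10)
  else []
termination_by n.toNat
decreasing_by
  rw [PySem.Int.floordiv_eq_ediv_of_pos (by norm_num : (0:Int) < 10)]
  omega

-- iterative Euclid: `while d: g, d = d, g % d`
def euclidStep (g d : Int) : Int :=
  if _h : d = 0 then g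
  else euclidStep d (PySem.Int.mod g d)
termination_by d.natAbs
decreasing_by exact pv_mod_natAbs_lt g d _h

def digitGCD_alt (n : Int) : Int := (digitsOf n).foldl euclidStep 0

-- ===== PRECONDITION & SPEC =====
def Spec_digitGCD (n : Int) (out : Int) : Prop := out = digitGCD_alt n
instance (n : Int) (out : Int) : Decidable (Spec_digitGCD n out) := by unfold Spec_digitGCD; infer_instance

-- ===== CLAIM (what is proved, stated in full; the proofs are below) =====
def Claim_equal_digitGCD : Prop := ∀ (n : Int), Dom_digitGCD n → Spec_digitGCD n (digitGCD n)

-- ===== LEMMAS AND PROOFS =====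

theorem findGcd_eq_gcd (a b : Int) (ha : 0 ≤ a) (hb : 0 ≤ b) :
    findGcd a b = (Int.gcd a b : Int) := by
  fun_induction findGcd a b with
  | case1 b =>
    rw [Int.gcd_zero_left]
    exact (Int.natAbs_of_nonneg hb).symm
  | case2 a b h ih =>
    have hpos : 0 < a := lt_of_le_of_ne ha (Ne.symm h)
    have h1 := PySem.Int.mod_nonneg b hpos
    rw [ih h1 ha, PySem.Int.mod_eq_emod_of_pos hpos, Int.gcd_emod, Int.gcd_comm]
    

theorem euclidStep_eq_gcd (g d : Int) (hg : 0 ≤ g) (hd : 0 ≤ d) :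
    euclidStep g d = (Int.gcd g d : Int) := by
  fun_induction euclidStep g d with
  | case1 g =>
    rw [Int.gcd_zero_right]
    exact (Int.natAbs_of_nonneg hg).symm
  | case2 g d h ih =>
    have hpos : 0 < d := lt_of_le_of_ne hd (Ne.symm h)
    have h1 := PySem.Int.mod_nonneg g hpos
    rw [ih hd h1, PySem.Int.mod_eq_emod_of_pos hpos, Int.gcd_comm d, Int.gcd_emod]

theorem euclidStep_one (d : Int) (hd : 0 ≤ d) : euclidStep 1 d = 1 := by
  rw [euclidStep_eq_gcd 1 d (by norm_num) hd]
  simp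

theorem digitsOf_nonneg (n : Int) : ∀ x ∈ digitsOf n, 0 ≤ x := by
  fun_induction digitsOf n with
  | case1 n h ih =>
    intro x hx
    rcases List.mem_cons.mp hx with h1 | h1
    · subst h1; exact PySem.Int.mod_nonneg n (by norm_num)
    · exact ih x h1
  | case2 n h => simp

theorem foldl_euclidStep_one (l : List Int) (hl : ∀ x ∈ l, 0 ≤ x) :
    l.foldl euclidStep 1 = 1 := by
  induction l with
  | nil => rfl
  | cons x xs ih =>
    simp only [List.foldl_cons]
    rw [euclidStep_one x (hl x (by simp))]
    exact ih (fun y hy => hl y (List.mem_cons_of_mem _ hy))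

theorem loopA_eq_fold (k : Nat) : ∀ (n g : Int), n.toNat ≤ k → 0 ≤ g →
    digitGCDLoopA n g = (digitsOf n).foldl euclidStep g := by
  induction k with
  | zero =>
    intro n g hk _
    have hn : ¬ 0 < n := by omega
    rw [digitGCDLoopA, digitsOf]
    simp [hn]
  | succ k ih =>
    intro n g hk hg
    by_cases hn : 0 < n
    · have hd0 : (0:Int) < 10 := by norm_num
      have hdn : 0 ≤ PySem.Int.mod n 10 := PySem.Int.mod_nonneg n hd0
      have hgg : findGcd g (PySem.Int.mod n 10) = euclidStep g (PySem.Int.mod n 10) := by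
        rw [findGcd_eq_gcd _ _ hg hdn, euclidStep_eq_gcd _ _ hg hdn]
      have hggn : 0 ≤ euclidStep g (PySem.Int.mod n 10) := by
        rw [euclidStep_eq_gcd _ _ hg hdn]; exact Int.natCast_nonneg _
      have hrec : (PySem.Int.floordiv n 10).toNat ≤ k := by
        rw [PySem.Int.floordiv_eq_ediv_of_pos hd0]; omega
      rw [digitGCDLoopA, digitsOf]
      simp only [hn, dif_pos, List.foldl_cons, hgg]
      split_ifs with h1
      · rw [h1, foldl_euclidStep_one _ (digitsOf_nonneg _)]
      · exact ih _ _ hrec hggn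
    · rw [digitGCDLoopA, digitsOf]; simp [hn]

-- ===== VERDICT (by name: the statement is the Claim_ definition above) =====
theorem digitGCD_spec : Claim_equal_digitGCD := by
  intro n _
  unfold Spec_digitGCD digitGCD digitGCD_alt
  exact loopA_eq_fold n.toNat n 0 le_rfl le_rfl
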